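-- pv_equiv track=rewrite | github.com/katelyn98/katelyn98.github.io | scripts/update_bib_from_scholar.py | determine_abbr
-- ===== SOURCE A (Python) =====
-- def determine_abbr(bib: dict) -> str:
--     """
--     Returns 'workshop' if any textual field mentions a workshop, else 'conference'.
--     """
--
--     fields_to_check = [
--         "title",
--         "booktitle",
--         "journal",
--         "abstract",
--         "citation",
--         "note",
--     ]
--
--     for field in fields_to_check:
--         value = bib.get(field)
--         if value and "workshop" in str(value).lower():
--             return "Workshop Paper"
--     return "Conference Paper"
-- ===== SOURCE B (Python) =====
-- def determine_abbr(bib: dict) -> str: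
--     """
--     Returns 'workshop' if any textual field mentions a workshop, else 'conference'.
--     """
--     fields = ["title", "booktitle", "journal", "abstract", "citation", "note"]
--     text = " ".join(str(bib[f]) for f in fields if bib.get(f)).lower()
--     return "Workshop Paper" if "workshop" in text else "Conference Paper"
-- ===== Notes on version B (the rewrite author's own statement) =====
-- stated objective: simpler
-- what changed: Instead of a per-field early-return scan that lowercases and tests each field separately, B joins all present field values into one space-separated blob, lowercases it once, and does a single substring test.
import Mathlib
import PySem

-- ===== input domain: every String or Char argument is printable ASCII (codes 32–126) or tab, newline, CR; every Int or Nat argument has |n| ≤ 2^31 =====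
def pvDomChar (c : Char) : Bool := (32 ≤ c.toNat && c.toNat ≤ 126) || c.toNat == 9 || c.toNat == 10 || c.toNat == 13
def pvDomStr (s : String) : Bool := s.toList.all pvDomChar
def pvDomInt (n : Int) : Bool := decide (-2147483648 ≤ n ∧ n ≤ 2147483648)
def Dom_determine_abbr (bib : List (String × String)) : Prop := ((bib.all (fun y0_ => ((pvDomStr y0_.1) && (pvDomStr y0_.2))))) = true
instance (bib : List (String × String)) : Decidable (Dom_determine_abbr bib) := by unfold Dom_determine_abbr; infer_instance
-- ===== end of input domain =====

-- B joins the present field values into one space-separated blob, lowercases it once,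
-- and does a single substring test, instead of A's per-field early-return scan (simpler decomposition).


-- ===== PORT A =====
-- the fixed field list of A (B iterates the same list)
def pvFields : List String := ["title", "booktitle", "journal", "abstract", "citation", "note"]

-- A's for-loop with early return: scan the fields, return at the first match
def determineAbbrLoop (d : PySem.Dict String String) : List String → String
  | [] => "Conference Paper"
  | f :: rest =>
    match d.get? f with
    | some v =>
      if (v != "") && PySem.Str.isIn "workshop" (PySem.Str.lower v) then "Workshop Paper"
      else determineAbbrLoop d rest
    | none => determineAbbrLoop d rest

def determine_abbr (bib : List (String × String)) : String :=
  determineAbbrLoop (PySem.Dict.ofList bib) pvFields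

-- ===== PORT B =====
def determine_abbr_alt (bib : List (String × String)) : String :=
  let d := PySem.Dict.ofList bib
  let parts := pvFields.filterMap (fun f =>
    match d.get? f with
    | some v => if v != "" then some v else none
    | none => none)
  let text := PySem.Str.lower (PySem.Str.join " " parts)
  if PySem.Str.isIn "workshop" text then "Workshop Paper" else "Conference Paper"

-- ===== PRECONDITION & SPEC =====
def Spec_determine_abbr (bib : List (String × String)) (out : String) : Prop := out = determine_abbr_alt bib
instance (bib : List (String × String)) (out : String) : Decidable (Spec_determine_abbr bib out) := by unfold Spec_determine_abbr; infer_instance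

-- ===== CLAIM (what is proved, stated in full; the proofs are below) =====
def Claim_equal_determine_abbr : Prop := ∀ (bib : List (String × String)), Dom_determine_abbr bib → Spec_determine_abbr bib (determine_abbr bib)

-- ===== LEMMAS AND PROOFS =====

-- a space-free pattern is a prefix of a ++ ' ' :: b iff it is a prefix of a
theorem prefix_append_space {p : List Char} (hp : ' ' ∉ p) :
    ∀ (a b : List Char), (p <+: a ++ ' ' :: b ↔ p <+: a) := by
  induction p with
  | nil => intro a b; simp
  | cons x q ih =>
    intro a b
    cases a with
    | nil =>
      simp only [List.nil_append]
      constructor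
      · intro h
        rcases List.cons_prefix_cons.mp h with ⟨hx, -⟩
        exact absurd (hx ▸ List.mem_cons_self) hp
      · intro h; exact absurd h (by simp)
    | cons c a' =>
      simp only [List.cons_append, List.cons_prefix_cons]
      constructor
      · rintro ⟨hx, hq⟩
        exact ⟨hx, (ih (fun hm => hp (List.mem_cons_of_mem _ hm)) a' b).mp hq⟩
      · rintro ⟨hx, hq⟩
        exact ⟨hx, (ih (fun hm => hp (List.mem_cons_of_mem _ hm)) a' b).mpr hq⟩

-- a space-free pattern occurs in a ++ ' ' :: b iff it occurs in a or in b
theorem infix_append_space {p : List Char} (hp : ' ' ∉ p) :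
    ∀ (a b : List Char), (p <:+: a ++ ' ' :: b ↔ p <:+: a ∨ p <:+: b) := by
  intro a
  induction a with
  | nil =>
    intro b
    simp only [List.nil_append, List.infix_cons_iff, List.infix_nil]
    rw [show (' ' :: b = [] ++ ' ' :: b) from rfl, prefix_append_space hp [] b]
    simp
  | cons c a' ih =>
    intro b
    rw [List.cons_append, List.infix_cons_iff,
        show (c :: (a' ++ ' ' :: b) = (c :: a') ++ ' ' :: b) from rfl,
        prefix_append_space hp (c :: a') b, ih b, List.infix_cons_iff]
    tauto

-- the pattern, as chars
theorem workshop_no_space : ' ' ∉ ("workshop".toList) := by decide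

-- the single substring test on the lowercased space-joined blob equals "some part matches"
theorem isIn_lower_join (ps : List (List Char)) :
    (PySem.Chars.isIn "workshop".toList (PySem.Chars.lower (PySem.Chars.join [' '] ps)) = true)
      ↔ ∃ v ∈ ps, PySem.Chars.isIn "workshop".toList (PySem.Chars.lower v) = true := by
  induction ps with
  | nil =>
    rw [PySem.Chars.join_nil]
    simp only [List.not_mem_nil, false_and, exists_false, iff_false]
    rw [PySem.Chars.isIn_iff_infix]
    simp [PySem.Chars.lower, List.infix_nil]
  | cons v rest ih =>
    cases rest with
    | nil =>
      rw [PySem.Chars.join_singleton]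
      simp
    | cons w rest' =>
      rw [PySem.Chars.join_cons_cons]
      have hsplit : v ++ [' '] ++ PySem.Chars.join [' '] (w :: rest')
          = v ++ ' ' :: PySem.Chars.join [' '] (w :: rest') := by simp
      rw [hsplit]
      have hmap : PySem.Chars.lower (v ++ ' ' :: PySem.Chars.join [' '] (w :: rest'))
          = PySem.Chars.lower v ++ ' ' :: PySem.Chars.lower (PySem.Chars.join [' '] (w :: rest')) := by
        simp only [PySem.Chars.lower, List.map_append, List.map_cons]
        simp [show PySem.Chars.lowerChar ' ' = ' ' from by decide]
      rw [hmap, PySem.Chars.isIn_iff_infix,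
          infix_append_space workshop_no_space, ← PySem.Chars.isIn_iff_infix,
          ← PySem.Chars.isIn_iff_infix, ih]
      simp only [List.mem_cons]
      constructor
      · rintro (h | ⟨u, hu, h⟩)
        · exact ⟨v, Or.inl rfl, h⟩
        · exact ⟨u, Or.inr hu, h⟩
      · rintro ⟨u, (rfl | hu), h⟩
        · exact Or.inl h
        · exact Or.inr ⟨u, hu, h⟩

-- the per-field match predicate both programs decide
def pvPred (d : PySem.Dict String String) (f : String) : Bool :=
  match d.get? f with
  | some v => (v != "") && PySem.Str.isIn "workshop" (PySem.Str.lower v)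
  | none => false

-- A's early-return loop returns "Workshop Paper" iff some field matches
theorem loop_eq_any (d : PySem.Dict String String) :
    ∀ fs, determineAbbrLoop d fs =
      (if fs.any (pvPred d) then "Workshop Paper" else "Conference Paper") := by
  intro fs
  induction fs with
  | nil => rfl
  | cons f rest ih =>
    cases h : d.get? f with
    | none => simp [determineAbbrLoop, h, pvPred, ih]
    | some v =>
      simp only [determineAbbrLoop, h]
      by_cases hc : ((v != "") && PySem.Str.isIn "workshop" (PySem.Str.lower v)) = true
      · rw [if_pos hc]
        have ha : (f :: rest).any (pvPred d) = true := by
          simp only [List.any_cons, pvPred, h, hc, Bool.true_or]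
        rw [ha, if_pos rfl]
      · rw [if_neg hc, ih]
        have ha : (f :: rest).any (pvPred d) = rest.any (pvPred d) := by
          rw [List.any_cons]
          simp only [pvPred, h]
          rw [Bool.not_eq_true] at hc
          rw [hc, Bool.false_or]
        rw [ha]

-- B's single test equals "some field matches"
theorem blob_eq_any (d : PySem.Dict String String) (fs : List String) :
    PySem.Str.isIn "workshop"
      (PySem.Str.lower (PySem.Str.join " " (fs.filterMap (fun f =>
        match d.get? f with
        | some v => if v != "" then some v else none
        | none => none))))
      = fs.any (pvPred d) := by
  rw [Bool.eq_iff_iff]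
  rw [PySem.Str.isIn_eq, PySem.Str.toList_lower, PySem.Str.toList_join]
  have : (" " : String).toList = [' '] := by decide
  rw [this, isIn_lower_join]
  rw [List.any_eq_true]
  constructor
  · rintro ⟨cs, hcs, hin⟩
    rcases List.mem_map.mp hcs with ⟨v, hv, rfl⟩
    rcases List.mem_filterMap.mp hv with ⟨f, hf, hg⟩
    refine ⟨f, hf, ?_⟩
    cases h : d.get? f with
    | none => simp [h] at hg
    | some w =>
      simp only [h] at hg
      by_cases hw : (w != "") = true
      · rw [if_pos hw] at hg
        cases hg
        simp [pvPred, h, hw, PySem.Str.isIn_eq, PySem.Str.toList_lower] at hin ⊢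
        exact hin
      · rw [if_neg hw] at hg; cases hg
  · rintro ⟨f, hf, hp⟩
    unfold pvPred at hp
    cases h : d.get? f with
    | none => simp [h] at hp
    | some v =>
      simp only [h, Bool.and_eq_true] at hp
      refine ⟨v.toList, List.mem_map.mpr ⟨v, List.mem_filterMap.mpr ⟨f, hf, ?_⟩, rfl⟩, ?_⟩
      · simp [h, hp.1]
      · have := hp.2
        rw [PySem.Str.isIn_eq, PySem.Str.toList_lower] at this
        exact this

-- ===== VERDICT (by name: the statement is the Claim_ definition above) =====
theorem determine_abbr_spec : Claim_equal_determine_abbr := by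
  intro bib _
  unfold Spec_determine_abbr determine_abbr determine_abbr_alt
  simp only [loop_eq_any, blob_eq_any]
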